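-- pv_equiv track=rewrite | github.com/buddhave-amd/Sw_scripts | md5_compare/functionality_run.py | remove_param
-- ===== SOURCE A (Python) =====
-- def remove_param(command,param_to_remove):
--     splitcmd = command.split()
--     temp_command = []
--     removed = 0
--     length = len(splitcmd)
--     for i in range(length):
--         if splitcmd[i] == param_to_remove:
--             removed = 1
--             if param_to_remove == "-y" or param_to_remove == "-n":
--                 removed = 0
--         else:
--             if removed == 1:
--                 removed = 0
--                 if splitcmd[i][0] == "-" and splitcmd[i][0].isdigit():
--                     temp_command.append(splitcmd[i])
--             else:
--                 temp_command.append(splitcmd[i])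
--                 removed = 0
--
--     return (' '.join(temp_command))
-- ===== SOURCE B (Python) =====
-- def remove_param(command, param_to_remove):
--     tokens = command.split()
--     if param_to_remove in ("-y", "-n"):
--         kept = [t for t in tokens if t != param_to_remove]
--     else:
--         kept = [t for prev, t in zip([None] + tokens, tokens)
--                 if t != param_to_remove and prev != param_to_remove]
--     return ' '.join(kept)
-- ===== Notes on version B (the rewrite author's own statement) =====
-- stated objective: simpler
-- what changed: Replaces A's carried `removed` flag loop (with its dead digit-check branch) by a stateless comprehension that keeps each token unless it equals the param or follows an occurrence of a non -y/-n param, pairing tokens with their predecessor via zip.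
import Mathlib
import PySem

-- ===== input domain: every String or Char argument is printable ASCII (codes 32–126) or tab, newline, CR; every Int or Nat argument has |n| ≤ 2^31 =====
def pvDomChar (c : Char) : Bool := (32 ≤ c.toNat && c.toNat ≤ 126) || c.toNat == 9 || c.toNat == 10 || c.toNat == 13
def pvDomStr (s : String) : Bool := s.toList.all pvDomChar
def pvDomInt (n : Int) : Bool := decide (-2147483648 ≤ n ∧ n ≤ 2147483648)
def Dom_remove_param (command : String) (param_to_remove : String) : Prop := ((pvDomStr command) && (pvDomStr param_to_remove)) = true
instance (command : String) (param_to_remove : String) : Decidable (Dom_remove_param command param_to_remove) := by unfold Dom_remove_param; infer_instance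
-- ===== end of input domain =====

-- B replaces A's carried `removed` flag loop by a stateless filter over each token
-- paired with its predecessor (objective: simpler).

-- ===== PORT A =====
-- the for-loop over range(len(splitcmd)), carried state (temp_command, removed)
def removeLoopA (p : String) : List String → List String × Int → List String × Int
  | [], st => st
  | tok :: ts, (temp, removed) =>
      removeLoopA p ts
        (if tok == p then
          (temp, if p == "-y" || p == "-n" then 0 else 1)
        else if removed == 1 then
          -- splitcmd[i][0] == "-" and splitcmd[i][0].isdigit()
          (if (PySem.Str.pyGet? tok 0 == some '-')
              && ((PySem.Str.pyGet? tok 0).elim false PySem.Chars.isdigit)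
           then temp ++ [tok] else temp, 0)
        else (temp ++ [tok], 0))

def remove_param (command : String) (param_to_remove : String) : String :=
  PySem.Str.join " " (removeLoopA param_to_remove (PySem.Str.split₀ command) ([], 0)).1

-- ===== PORT B =====
def remove_param_alt (command : String) (param_to_remove : String) : String :=
  let tokens := PySem.Str.split₀ command
  let kept :=
    if param_to_remove == "-y" || param_to_remove == "-n" then
      tokens.filter (fun t => t != param_to_remove)
    else
      (((none :: tokens.map some).zip tokens).filter
        (fun pt => pt.2 != param_to_remove && pt.1 != some param_to_remove)).map Prod.snd
  PySem.Str.join " " kept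

-- ===== PRECONDITION & SPEC =====
def Spec_remove_param (command : String) (param_to_remove : String) (out : String) : Prop := out = remove_param_alt command param_to_remove
instance (command : String) (param_to_remove : String) (out : String) : Decidable (Spec_remove_param command param_to_remove out) := by unfold Spec_remove_param; infer_instance

-- ===== CLAIM (what is proved, stated in full; the proofs are below) =====
def Claim_equal_remove_param : Prop := ∀ (command : String) (param_to_remove : String), Dom_remove_param command param_to_remove → Spec_remove_param command param_to_remove (remove_param command param_to_remove)

-- ===== LEMMAS AND PROOFS =====

-- A's inner append condition is dead code: if the first char is '-', it is not a digit.
theorem deadCond (tok : String) :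
    ((PySem.Str.pyGet? tok 0 == some '-')
      && ((PySem.Str.pyGet? tok 0).elim false PySem.Chars.isdigit)) = false := by
  cases h : PySem.Str.pyGet? tok 0 with
  | none => simp
  | some c =>
    by_cases hc : c = '-'
    · subst hc; simp [PySem.Chars.isdigit]
    · simp [hc]

-- flag params (-y/-n): removed stays 0, the loop is a plain filter
theorem loopA_flag (p : String) (hf : (p == "-y" || p == "-n") = true) :
    ∀ (ts acc : List String),
      (removeLoopA p ts (acc, 0)).1 = acc ++ ts.filter (fun t => t != p) := by
  intro ts
  induction ts with
  | nil => intro acc; simp [removeLoopA]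
  | cons t ts ih =>
    intro acc
    by_cases ht : t = p
    · simp [removeLoopA, ht, hf, ih]
    · simp [removeLoopA, ht, ih]

-- non-flag params: the loop computes the prev-token filter of B
theorem loopA_nonflag (p : String) (hf : (p == "-y" || p == "-n") = false) :
    ∀ (ts acc : List String) (prev : Option String),
      (removeLoopA p ts (acc, if prev == some p then 1 else 0)).1
        = acc ++ (((prev :: ts.map some).zip ts).filter
            (fun pt => pt.2 != p && pt.1 != some p)).map Prod.snd := by
  intro ts
  induction ts with
  | nil => intro acc prev; simp [removeLoopA]
  | cons t ts ih =>
    intro acc prev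
    by_cases ht : t = p
    · have h1 : (removeLoopA p (t :: ts) (acc, if prev == some p then 1 else 0)).1
          = (removeLoopA p ts (acc, if (some t : Option String) == some p then 1 else 0)).1 := by
        simp [removeLoopA, ht, hf]
      rw [h1, ih]
      simp [List.filter_cons, ht]
    · by_cases hp : prev = some p
      · have h1 : (removeLoopA p (t :: ts) (acc, if prev == some p then 1 else 0)).1
            = (removeLoopA p ts (acc, if (some t : Option String) == some p then 1 else 0)).1 := by
          simp only [removeLoopA]
          rw [if_neg (by simp [ht])]
          rw [if_pos (by simp [hp])]
          simp only [deadCond, Bool.false_eq_true, if_false]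
          simp [ht]
        rw [h1, ih]
        simp [hp]
      · have h1 : (removeLoopA p (t :: ts) (acc, if prev == some p then 1 else 0)).1
            = (removeLoopA p ts (acc ++ [t], if (some t : Option String) == some p then 1 else 0)).1 := by
          simp [removeLoopA, ht, hp]
        rw [h1, ih]
        simp [ht, hp]

-- ===== VERDICT (by name: the statement is the Claim_ definition above) =====
theorem remove_param_spec : Claim_equal_remove_param := by
  intro command p _
  unfold Spec_remove_param remove_param remove_param_alt
  by_cases hf : (p == "-y" || p == "-n") = true
  · rw [show ((0 : Int)) = (if (none : Option String) == some p then 1 else 0) by simp] at *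
    simp only [hf, if_true]
    rw [show (if (none : Option String) == some p then (1:Int) else 0) = 0 by simp]
    rw [loopA_flag p hf]
    simp
  · simp only [Bool.not_eq_true] at hf
    simp only [hf]
    rw [show ((0 : Int)) = (if (none : Option String) == some p then 1 else 0) by simp]
    rw [loopA_nonflag p hf]
    simp
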